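-- pv_equiv track=rewrite | github.com/wearethevisionaries/problem-solving | week10/[3차] 방금그곡_송인성.py | change_melody
-- ===== SOURCE A (Python) =====
-- def change_melody(music):
--     replace_dict = {'A#':'a',
--                    'C#':'c',
--                    'D#':'d',
--                    'F#':'f',
--                    'G#':'g'}
--     for ori, new in replace_dict.items():
--         music = music.replace(ori, new)
--     return music
-- ===== SOURCE B (Python) =====
-- def change_melody(music):
--     sharp = {'A': 'a', 'C': 'c', 'D': 'd', 'F': 'f', 'G': 'g'}
--     out = []
--     i = 0
--     n = len(music)
--     while i < n:
--         c = music[i]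
--         if c in sharp and i + 1 < n and music[i + 1] == '#':
--             out.append(sharp[c])
--             i += 2
--         else:
--             out.append(c)
--             i += 1
--     return ''.join(out)
-- ===== Notes on version B (the rewrite author's own statement) =====
-- stated objective: alternative
-- what changed: Replaces the five sequential str.replace passes over the whole string with a single left-to-right scan that inspects a two-char window and consults a note-to-symbol dict, building the output once.
import Mathlib
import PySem

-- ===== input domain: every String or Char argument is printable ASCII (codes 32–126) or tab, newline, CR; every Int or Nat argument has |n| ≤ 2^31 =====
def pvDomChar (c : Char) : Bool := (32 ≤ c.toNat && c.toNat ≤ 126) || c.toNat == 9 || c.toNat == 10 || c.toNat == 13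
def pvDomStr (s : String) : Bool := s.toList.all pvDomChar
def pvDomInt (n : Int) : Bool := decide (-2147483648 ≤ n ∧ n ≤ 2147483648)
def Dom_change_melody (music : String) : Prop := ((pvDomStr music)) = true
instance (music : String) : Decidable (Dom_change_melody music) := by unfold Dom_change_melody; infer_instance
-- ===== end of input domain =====

-- B replaces A's five sequential str.replace passes by one left-to-right scan with a
-- two-char window and a note→symbol dict; same return value, no side effects.

-- ===== PORT A =====
def change_melody (music : String) : String :=
  let m1 := PySem.Str.replace music "A#" "a"
  let m2 := PySem.Str.replace m1 "C#" "c"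
  let m3 := PySem.Str.replace m2 "D#" "d"
  let m4 := PySem.Str.replace m3 "F#" "f"
  PySem.Str.replace m4 "G#" "g"

-- ===== PORT B =====
def cmSharp : PySem.Dict Char Char :=
  PySem.Dict.mk [('A', 'a'), ('C', 'c'), ('D', 'd'), ('F', 'f'), ('G', 'g')]

-- the while loop of Source B: window of current char + next, dict lookup, advance 1 or 2
def cmScan : List Char → List Char
  | [] => []
  | [c] => [c]
  | c :: d :: t =>
    match cmSharp.get? c with
    | some y => if d = '#' then y :: cmScan t else c :: cmScan (d :: t)
    | none => c :: cmScan (d :: t)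
termination_by l => l.length

def change_melody_alt (music : String) : String :=
  String.ofList (cmScan music.toList)

-- ===== PRECONDITION & SPEC =====
def Spec_change_melody (music : String) (out : String) : Prop := out = change_melody_alt music
instance (music : String) (out : String) : Decidable (Spec_change_melody music out) := by unfold Spec_change_melody; infer_instance

-- ===== CLAIM (what is proved, stated in full; the proofs are below) =====
def Claim_equal_change_melody : Prop := ∀ (music : String), Dom_change_melody music → Spec_change_melody music (change_melody music)

-- ===== LEMMAS AND PROOFS =====

-- single-pattern scan: what one `s.replace(x + '#', y)` does
def scan1 (x y : Char) : List Char → List Char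
  | [] => []
  | [c] => [c]
  | c :: d :: t => if c = x ∧ d = '#' then y :: scan1 x y t else c :: scan1 x y (d :: t)
termination_by l => l.length

theorem scan1_cons_ne (x y c : Char) (t : List Char)
    (h : ¬(c = x ∧ t.head? = some '#')) :
    scan1 x y (c :: t) = c :: scan1 x y t := by
  cases t with
  | nil => simp [scan1]
  | cons d t' =>
    simp only [scan1]
    rw [if_neg]
    intro ⟨h1, h2⟩
    exact h ⟨h1, by simp [h2]⟩

theorem scan1_head_sharp (x y : Char) (t : List Char) (hx : x ≠ '#') (hy : y ≠ '#') :
    ((scan1 x y t).head? = some '#') ↔ (t.head? = some '#') := by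
  match t with
  | [] => simp [scan1]
  | [c] => simp [scan1]
  | c :: d :: t' =>
    simp only [scan1]
    split
    · rename_i hcd
      simp [hy, hcd.1, hx]
    · simp

theorem replace_go_eq (x y : Char) :
    ∀ (fuel : Nat) (l acc : List Char), l.length ≤ fuel →
      PySem.Chars.replace.go [x, '#'] [y] fuel l acc = acc.reverse ++ scan1 x y l := by
  intro fuel
  induction fuel with
  | zero =>
    intro l acc h
    have hl : l = [] := by cases l <;> simp_all
    subst hl
    simp [PySem.Chars.replace.go, scan1]
  | succ n ih =>
    intro l acc h
    match l with
    | [] => simp [PySem.Chars.replace.go, scan1]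
    | c :: t =>
      rw [PySem.Chars.replace.go]
      match t with
      | [] =>
        have hpre : List.isPrefixOf [x, '#'] [c] = false := by
          simp [List.isPrefixOf]
        simp only [hpre, Bool.false_eq_true, if_false]
        rw [ih [] (c :: acc) (by simp)]
        simp [scan1]
      | d :: t' =>
        by_cases hm : c = x ∧ d = '#'
        · have hpre : List.isPrefixOf [x, '#'] (c :: d :: t') = true := by
            simp [List.isPrefixOf, hm.1, hm.2]
          simp only [hpre, if_true]
          rw [show List.drop [x, '#'].length (c :: d :: t') = t' by simp]
          rw [ih t' ([y].reverse ++ acc) (by simp at h ⊢; omega)]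
          simp [scan1, hm.1, hm.2]
        · have hpre : List.isPrefixOf [x, '#'] (c :: d :: t') = false := by
            cases h1 : (x == c) <;> cases h2 : ('#' == d) <;>
              simp only [List.isPrefixOf, List.isPrefixOf_nil_left, h1, h2, Bool.and_true,
                Bool.and_false, Bool.false_and]
            exact absurd ⟨(beq_iff_eq.mp h1).symm, (beq_iff_eq.mp h2).symm⟩ hm
          simp only [hpre, Bool.false_eq_true, if_false]
          rw [ih (d :: t') (c :: acc) (by simp at h ⊢; omega)]
          simp only [scan1, if_neg hm]
          simp

theorem chars_replace_eq (x y : Char) (s : List Char) :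
    PySem.Chars.replace s [x, '#'] [y] = scan1 x y s := by
  rw [PySem.Chars.replace]
  simp only [List.isEmpty_cons, Bool.false_eq_true, if_false]
  exact replace_go_eq x y s.length s [] (le_refl _)

-- the composed five passes, as a fold over the pattern list
def cmPats : List (Char × Char) := [('A', 'a'), ('C', 'c'), ('D', 'd'), ('F', 'f'), ('G', 'g')]

def scans (ps : List (Char × Char)) (s : List Char) : List Char :=
  ps.foldl (fun s p => scan1 p.1 p.2 s) s

theorem scans_cons_pass (ps : List (Char × Char)) (c : Char) (t : List Char)
    (hp : ∀ p ∈ ps, p.1 ≠ '#' ∧ p.2 ≠ '#')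
    (hc : ∀ p ∈ ps, ¬(c = p.1 ∧ t.head? = some '#')) :
    scans ps (c :: t) = c :: scans ps t := by
  induction ps generalizing c t with
  | nil => rfl
  | cons p ps ih =>
    simp only [scans, List.foldl_cons]
    rw [scan1_cons_ne p.1 p.2 c t (hc p (by simp))]
    exact ih c (scan1 p.1 p.2 t)
      (fun q hq => hp q (by simp [hq]))
      (fun q hq => by
        rw [scan1_head_sharp p.1 p.2 t (hp p (by simp)).1 (hp p (by simp)).2]
        exact hc q (by simp [hq]))

theorem scans_fire_A (t : List Char) : scans cmPats ('A' :: '#' :: t) = 'a' :: scans cmPats t := by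
  simp only [cmPats, scans, List.foldl_cons, List.foldl_nil]
  rw [show scan1 'A' 'a' ('A' :: '#' :: t) = 'a' :: scan1 'A' 'a' t by simp [scan1]]
  rw [scan1_cons_ne _ _ _ _ (by simp), scan1_cons_ne _ _ _ _ (by simp),
      scan1_cons_ne _ _ _ _ (by simp), scan1_cons_ne _ _ _ _ (by simp)]

theorem scans_fire_C (t : List Char) : scans cmPats ('C' :: '#' :: t) = 'c' :: scans cmPats t := by
  simp only [cmPats, scans, List.foldl_cons, List.foldl_nil]
  rw [scan1_cons_ne 'A' _ _ _ (by simp), scan1_cons_ne 'A' _ _ _ (by simp)]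
  rw [show ∀ u, scan1 'C' 'c' ('C' :: '#' :: u) = 'c' :: scan1 'C' 'c' u from fun u => by simp [scan1]]
  rw [scan1_cons_ne _ _ _ _ (by simp), scan1_cons_ne _ _ _ _ (by simp),
      scan1_cons_ne _ _ _ _ (by simp)]

theorem scans_fire_D (t : List Char) : scans cmPats ('D' :: '#' :: t) = 'd' :: scans cmPats t := by
  simp only [cmPats, scans, List.foldl_cons, List.foldl_nil]
  rw [scan1_cons_ne 'A' _ _ _ (by simp), scan1_cons_ne 'A' _ _ _ (by simp),
      scan1_cons_ne 'C' _ _ _ (by simp), scan1_cons_ne 'C' _ _ _ (by simp)]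
  rw [show ∀ u, scan1 'D' 'd' ('D' :: '#' :: u) = 'd' :: scan1 'D' 'd' u from fun u => by simp [scan1]]
  rw [scan1_cons_ne _ _ _ _ (by simp), scan1_cons_ne _ _ _ _ (by simp)]

theorem scans_fire_F (t : List Char) : scans cmPats ('F' :: '#' :: t) = 'f' :: scans cmPats t := by
  simp only [cmPats, scans, List.foldl_cons, List.foldl_nil]
  rw [scan1_cons_ne 'A' _ _ _ (by simp), scan1_cons_ne 'A' _ _ _ (by simp),
      scan1_cons_ne 'C' _ _ _ (by simp), scan1_cons_ne 'C' _ _ _ (by simp),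
      scan1_cons_ne 'D' _ _ _ (by simp), scan1_cons_ne 'D' _ _ _ (by simp)]
  rw [show ∀ u, scan1 'F' 'f' ('F' :: '#' :: u) = 'f' :: scan1 'F' 'f' u from fun u => by simp [scan1]]
  rw [scan1_cons_ne _ _ _ _ (by simp)]

theorem scans_fire_G (t : List Char) : scans cmPats ('G' :: '#' :: t) = 'g' :: scans cmPats t := by
  simp only [cmPats, scans, List.foldl_cons, List.foldl_nil]
  rw [scan1_cons_ne 'A' _ _ _ (by simp), scan1_cons_ne 'A' _ _ _ (by simp),
      scan1_cons_ne 'C' _ _ _ (by simp), scan1_cons_ne 'C' _ _ _ (by simp),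
      scan1_cons_ne 'D' _ _ _ (by simp), scan1_cons_ne 'D' _ _ _ (by simp),
      scan1_cons_ne 'F' _ _ _ (by simp), scan1_cons_ne 'F' _ _ _ (by simp)]
  rw [show ∀ u, scan1 'G' 'g' ('G' :: '#' :: u) = 'g' :: scan1 'G' 'g' u from fun u => by simp [scan1]]

theorem cmScan_fire (y c : Char) (h : cmSharp.get? c = some y) (t : List Char) :
    cmScan (c :: '#' :: t) = y :: cmScan t := by
  rw [cmScan, h]; simp

theorem scans_eq_cmScan : ∀ (n : Nat) (s : List Char), s.length ≤ n → scans cmPats s = cmScan s := by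
  intro n
  induction n with
  | zero =>
    intro s h
    have hs : s = [] := by cases s <;> simp_all
    subst hs; simp [scans, cmPats, cmScan, scan1]
  | succ n ih =>
    intro s h
    match s with
    | [] => simp [scans, cmPats, cmScan, scan1]
    | c :: rest =>
      match rest with
      | [] =>
        rw [scans_cons_pass cmPats c [] (by decide) (by simp)]
        simp [scans, cmPats, cmScan, scan1]
      | d :: t =>
        by_cases hd : d = '#'
        · subst hd
          rcases hg : cmSharp.get? c with _ | y
          · rw [scans_cons_pass cmPats c ('#' :: t) (by decide)
              (fun p hp => by
                intro ⟨h1, _⟩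
                subst h1
                fin_cases hp <;> simp [cmSharp, PySem.Dict.get?, List.find?] at hg)]
            rw [ih ('#' :: t) (by simp at h ⊢; omega)]
            conv_rhs => rw [cmScan]
            rw [hg]
          · have hc5 : c = 'A' ∨ c = 'C' ∨ c = 'D' ∨ c = 'F' ∨ c = 'G' := by
              by_contra hcon
              push Not at hcon
              obtain ⟨h1, h2, h3, h4, h5⟩ := hcon
              have e1 : ('A' == c) = false := beq_eq_false_iff_ne.mpr (Ne.symm h1)
              have e2 : ('C' == c) = false := beq_eq_false_iff_ne.mpr (Ne.symm h2)
              have e3 : ('D' == c) = false := beq_eq_false_iff_ne.mpr (Ne.symm h3)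
              have e4 : ('F' == c) = false := beq_eq_false_iff_ne.mpr (Ne.symm h4)
              have e5 : ('G' == c) = false := beq_eq_false_iff_ne.mpr (Ne.symm h5)
              simp [cmSharp, PySem.Dict.get?, List.find?, e1, e2, e3, e4, e5] at hg
            have hrec := ih t (by simp at h ⊢; omega)
            rcases hc5 with h1 | h1 | h1 | h1 | h1 <;> subst h1 <;>
              simp only [cmSharp, PySem.Dict.get?, List.find?] at hg <;>
              simp at hg <;> subst hg
            · rw [scans_fire_A, hrec, cmScan_fire 'a' 'A' (by decide) t]
            · rw [scans_fire_C, hrec, cmScan_fire 'c' 'C' (by decide) t]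
            · rw [scans_fire_D, hrec, cmScan_fire 'd' 'D' (by decide) t]
            · rw [scans_fire_F, hrec, cmScan_fire 'f' 'F' (by decide) t]
            · rw [scans_fire_G, hrec, cmScan_fire 'g' 'G' (by decide) t]
        · rw [scans_cons_pass cmPats c (d :: t) (by decide)
            (fun p hp => by intro ⟨_, h2⟩; simp at h2; exact hd h2)]
          rw [ih (d :: t) (by simp at h ⊢; omega)]
          conv_rhs => rw [cmScan]
          rcases hg : cmSharp.get? c with _ | y <;> simp [hd]

theorem change_melody_toList (music : String) :
    (change_melody music).toList = scans cmPats music.toList := by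
  simp only [change_melody, PySem.Str.replace, String.toList_ofList]
  rw [show ("A#" : String).toList = ['A', '#'] by decide, show ("a" : String).toList = ['a'] by decide,
      show ("C#" : String).toList = ['C', '#'] by decide, show ("c" : String).toList = ['c'] by decide,
      show ("D#" : String).toList = ['D', '#'] by decide, show ("d" : String).toList = ['d'] by decide,
      show ("F#" : String).toList = ['F', '#'] by decide, show ("f" : String).toList = ['f'] by decide,
      show ("G#" : String).toList = ['G', '#'] by decide, show ("g" : String).toList = ['g'] by decide]
  rw [chars_replace_eq, chars_replace_eq, chars_replace_eq, chars_replace_eq, chars_replace_eq]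
  simp [scans, cmPats]

-- ===== VERDICT (by name: the statement is the Claim_ definition above) =====
theorem change_melody_spec : Claim_equal_change_melody := by
  intro music _
  unfold Spec_change_melody change_melody_alt
  rw [← scans_eq_cmScan music.toList.length music.toList (le_refl _),
      ← change_melody_toList, String.ofList_toList]
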